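-- pv_equiv track=rewrite | github.com/zinnix/MyPython | winpython.py | abcheck
-- ===== SOURCE A (Python) =====
-- def abcheck(str):
--     for i in range(len(str)):
--         try:
--           if str[i] == "a" and str[i + 4] == "b":
--             return "true"
--           elif str[i] == "b" and str[i + 4] == "a":
--             return "true"
--         except:
--           return "false"
--     return "false"
-- ===== SOURCE B (Python) =====
-- def abcheck(str):
--     a_pos = {i for i, c in enumerate(str) if c == "a"}
--     b_pos = {i for i, c in enumerate(str) if c == "b"}
--     hit = (a_pos & {j - 4 for j in b_pos}) | (b_pos & {j - 4 for j in a_pos})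
--     return "true" if hit else "false"
-- ===== Notes on version B (the rewrite author's own statement) =====
-- stated objective: alternative
-- what changed: Instead of scanning positions and comparing characters 4 apart, B builds the index sets of 'a's and 'b's once and answers by set algebra: intersect each set with the other shifted down by 4 and test the union for emptiness.
import Mathlib
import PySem

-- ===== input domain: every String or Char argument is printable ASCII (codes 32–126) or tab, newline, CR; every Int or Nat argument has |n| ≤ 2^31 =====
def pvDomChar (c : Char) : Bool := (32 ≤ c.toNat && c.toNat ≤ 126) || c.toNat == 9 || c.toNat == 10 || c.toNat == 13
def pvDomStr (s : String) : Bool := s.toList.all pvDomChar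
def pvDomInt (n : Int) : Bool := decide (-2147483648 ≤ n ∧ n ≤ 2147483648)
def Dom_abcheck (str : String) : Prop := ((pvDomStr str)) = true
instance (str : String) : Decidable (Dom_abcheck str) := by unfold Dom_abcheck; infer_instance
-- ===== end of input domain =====

-- B replaces A's guarded positional scan by set algebra: build the index sets of 'a's and
-- 'b's once, intersect each with the other shifted down by 4, and test for emptiness (alternative; same cost).

-- ===== PORT A =====
-- body of 'for i in range(len(str))' with the try/except: IndexError on str[i+4] (pyGet? = none) returns "false"
def abcheckGo (cs : List Char) : List Int → String
  | [] => "false"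
  | i :: rest =>
    match PySem.List.pyGet? cs i with
    | none => "false"          -- except: IndexError on str[i]
    | some c =>
      if c = 'a' then
        match PySem.List.pyGet? cs (i + 4) with
        | none => "false"      -- except: IndexError on str[i+4]
        | some d => if d = 'b' then "true" else abcheckGo cs rest
      else if c = 'b' then
        match PySem.List.pyGet? cs (i + 4) with
        | none => "false"      -- except: IndexError on str[i+4]
        | some d => if d = 'a' then "true" else abcheckGo cs rest
      else abcheckGo cs rest

def abcheck (str : String) : String :=
  abcheckGo str.toList (PySem.List.pyRange 0 (str.toList.length : Int) 1)

-- ===== PORT B =====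
-- a_pos / b_pos: set comprehensions over enumerate(str); hit: (a_pos & {j-4 for j in b_pos}) | (b_pos & {j-4 for j in a_pos})
def abcheck_alt (str : String) : String :=
  let cs := str.toList
  let aPos : PySem.Set Int :=
    PySem.Set.ofList (((PySem.List.enumerate cs 0).filter (fun p => p.2 == 'a')).map (·.1))
  let bPos : PySem.Set Int :=
    PySem.Set.ofList (((PySem.List.enumerate cs 0).filter (fun p => p.2 == 'b')).map (·.1))
  let hit : PySem.Set Int :=
    PySem.Set.union (PySem.Set.inter aPos (PySem.Set.ofList (bPos.map (· - 4))))
                    (PySem.Set.inter bPos (PySem.Set.ofList (aPos.map (· - 4))))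
  if hit.isEmpty then "false" else "true"

-- ===== PRECONDITION & SPEC =====
def Spec_abcheck (str : String) (out : String) : Prop := out = abcheck_alt str
instance (str : String) (out : String) : Decidable (Spec_abcheck str out) := by unfold Spec_abcheck; infer_instance

-- ===== CLAIM (what is proved, stated in full; the proofs are below) =====
def Claim_equal_abcheck : Prop := ∀ (str : String), Dom_abcheck str → Spec_abcheck str (abcheck str)

-- ===== LEMMAS AND PROOFS =====

-- the shared characterisation: position k holds characters 4 apart equal to a/b or b/a
def pairAt (cs : List Char) (k : Nat) : Prop :=
  (cs[k]? = some 'a' ∧ cs[k + 4]? = some 'b') ∨ (cs[k]? = some 'b' ∧ cs[k + 4]? = some 'a')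

theorem abcheckGo_cases (cs : List Char) (l : List Int) :
    abcheckGo cs l = "true" ∨ abcheckGo cs l = "false" := by
  induction l with
  | nil => right; rfl
  | cons i rest ih =>
    simp only [abcheckGo]
    rcases h : PySem.List.pyGet? cs i with _ | c
    · right; rfl
    · by_cases hc : c = 'a'
      · simp only [if_pos hc]
        rcases PySem.List.pyGet? cs (i + 4) with _ | d
        · right; rfl
        · by_cases hd : d = 'b' <;> simp [hd, ih]
      · by_cases hb : c = 'b'
        · simp only [if_neg hc, if_pos hb]
          rcases PySem.List.pyGet? cs (i + 4) with _ | d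
          · right; rfl
          · by_cases hd : d = 'a' <;> simp [hd, ih]
        · simpa [hc, hb] using ih

-- A's loop from index i returns "true" iff a pair exists at or after i
theorem abcheckGo_true_iff (cs : List Char) (n : Nat) (i : Nat) (hn : cs.length - i ≤ n) :
    abcheckGo cs (PySem.List.pyRange (i : Int) (cs.length : Int) 1) = "true" ↔
      ∃ k : Nat, i ≤ k ∧ pairAt cs k := by
  induction n generalizing i with
  | zero =>
    have hi : cs.length ≤ i := by omega
    rw [PySem.List.pyRange_one_eq_nil (by exact_mod_cast hi)]
    simp only [abcheckGo]
    constructor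
    · intro h; exact absurd h (by decide)
    · rintro ⟨k, hik, hp⟩
      rcases hp with ⟨h1, -⟩ | ⟨h1, -⟩ <;>
        { obtain ⟨hlt, -⟩ := List.getElem?_eq_some_iff.1 h1; omega }
  | succ n ih =>
    by_cases hi : i < cs.length
    · rw [PySem.List.pyRange_one_cons (by exact_mod_cast hi)]
      have hcast : ((i : Int) + 1) = ((i + 1 : Nat) : Int) := by push_cast; ring
      have hcast4 : ((i : Int) + 4) = ((i + 4 : Nat) : Int) := by push_cast; ring
      have hih := ih (i + 1) (by omega)
      rw [hcast] at *
      simp only [abcheckGo, PySem.List.pyGet?_natCast, List.getElem?_eq_getElem hi, hcast4]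
      have hshift : ¬ pairAt cs i →
          ((∃ k : Nat, i + 1 ≤ k ∧ pairAt cs k) ↔ (∃ k : Nat, i ≤ k ∧ pairAt cs k)) := by
        intro hnp
        constructor
        · rintro ⟨k, hik, hp⟩; exact ⟨k, by omega, hp⟩
        · rintro ⟨k, hik, hp⟩
          rcases Nat.eq_or_lt_of_le hik with rfl | h
          · exact absurd hp hnp
          · exact ⟨k, h, hp⟩
      by_cases h4 : i + 4 < cs.length
      · rw [List.getElem?_eq_getElem h4]
        have hpair_iff : pairAt cs i ↔
            ((cs[i] = 'a' ∧ cs[i + 4] = 'b') ∨ (cs[i] = 'b' ∧ cs[i + 4] = 'a')) := by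
          simp [pairAt, List.getElem?_eq_getElem hi, List.getElem?_eq_getElem h4]
        by_cases ha : cs[i] = 'a'
        · rw [if_pos ha]
          by_cases hb4 : cs[i + 4] = 'b'
          · exact iff_of_true (by simp [hb4]) ⟨i, le_refl i, hpair_iff.2 (Or.inl ⟨ha, hb4⟩)⟩
          · have hnp : ¬ pairAt cs i := by
              rw [hpair_iff]
              rintro (⟨h1, h2⟩ | ⟨h1, h2⟩)
              · exact hb4 h2
              · rw [ha] at h1; exact absurd h1 (by decide)
            simp only [hb4, reduceIte, hih]
            exact hshift hnp
        · by_cases hb : cs[i] = 'b'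
          · rw [if_neg ha, if_pos hb]
            by_cases ha4 : cs[i + 4] = 'a'
            · exact iff_of_true (by simp [ha4]) ⟨i, le_refl i, hpair_iff.2 (Or.inr ⟨hb, ha4⟩)⟩
            · have hnp : ¬ pairAt cs i := by
                rw [hpair_iff]
                rintro (⟨h1, h2⟩ | ⟨h1, h2⟩)
                · rw [hb] at h1; exact absurd h1 (by decide)
                · exact ha4 h2
              simp only [ha4, reduceIte, hih]
              exact hshift hnp
          · have hnp : ¬ pairAt cs i := by
              rw [hpair_iff]
              rintro (⟨h1, -⟩ | ⟨h1, -⟩)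
              · exact ha h1
              · exact hb h1
            rw [if_neg ha, if_neg hb, hih]
            exact hshift hnp
      · -- str[i+4] out of range: if str[i] is 'a' or 'b' A hits the except; no pair at ≥ i exists
        have hget4 : (cs[i + 4]? : Option Char) = none := List.getElem?_eq_none (by omega)
        have hnone : ∀ k : Nat, i ≤ k → ¬ pairAt cs k := by
          rintro k hik (⟨-, h2⟩ | ⟨-, h2⟩) <;>
            { obtain ⟨hlt, -⟩ := List.getElem?_eq_some_iff.1 h2; omega }
        have hnp : ¬ pairAt cs i := hnone i (le_refl i)
        rw [hget4]
        by_cases ha : cs[i] = 'a'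
        · rw [if_pos ha]
          exact iff_of_false (by intro h; simp at h) fun ⟨k, hik, hp⟩ => hnone k hik hp
        · by_cases hb : cs[i] = 'b'
          · rw [if_neg ha, if_pos hb]
            exact iff_of_false (by intro h; simp at h) fun ⟨k, hik, hp⟩ => hnone k hik hp
          · rw [if_neg ha, if_neg hb, hih]
            exact hshift hnp
    · rw [PySem.List.pyRange_one_eq_nil (by exact_mod_cast (by omega : cs.length ≤ i))]
      simp only [abcheckGo]
      constructor
      · intro h; exact absurd h (by decide)
      · rintro ⟨k, hik, hp⟩
        rcases hp with ⟨h1, -⟩ | ⟨h1, -⟩ <;>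
          { obtain ⟨hlt, -⟩ := List.getElem?_eq_some_iff.1 h1; omega }

-- A = "true" iff a pair exists
theorem abcheck_true_iff (str : String) :
    abcheck str = "true" ↔ ∃ k : Nat, pairAt str.toList k := by
  rw [abcheck, show (0 : Int) = ((0 : Nat) : Int) from rfl,
    abcheckGo_true_iff str.toList str.toList.length 0 (by omega)]
  constructor
  · rintro ⟨k, -, hp⟩; exact ⟨k, hp⟩
  · rintro ⟨k, hp⟩; exact ⟨k, Nat.zero_le k, hp⟩

-- membership in B's position sets
theorem mem_posSet (cs : List Char) (c : Char) (x : Int) :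
    x ∈ PySem.Set.ofList (((PySem.List.enumerate cs 0).filter (fun p => p.2 == c)).map (·.1)) ↔
      ∃ k : Nat, x = (k : Int) ∧ cs[k]? = some c := by
  rw [PySem.Set.mem_ofList, List.mem_map]
  constructor
  · rintro ⟨p, hp, rfl⟩
    rw [List.mem_filter] at hp
    obtain ⟨hmem, hc⟩ := hp
    rw [PySem.List.mem_enumerate_iff] at hmem
    obtain ⟨k, hk, rfl⟩ := hmem
    refine ⟨k, by push_cast; ring_nf, ?_⟩ -- index
    rw [List.getElem?_eq_getElem hk]
    simpa using hc
  · rintro ⟨k, rfl, hc⟩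
    obtain ⟨hk, hv⟩ := List.getElem?_eq_some_iff.1 hc
    refine ⟨((k : Int), cs[k]), ?_, rfl⟩
    rw [List.mem_filter]
    exact ⟨(PySem.List.mem_enumerate_iff cs 0 _).2 ⟨k, hk, by rw [zero_add]⟩, by simp [hv]⟩

-- B's hit set is nonempty iff a pair exists
theorem hitSet_iff (cs : List Char) :
    ¬ (PySem.Set.union
        (PySem.Set.inter
          (PySem.Set.ofList (((PySem.List.enumerate cs 0).filter (fun p => p.2 == 'a')).map (·.1)))
          (PySem.Set.ofList ((PySem.Set.ofList (((PySem.List.enumerate cs 0).filter (fun p => p.2 == 'b')).map (·.1))).map (· - 4))))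
        (PySem.Set.inter
          (PySem.Set.ofList (((PySem.List.enumerate cs 0).filter (fun p => p.2 == 'b')).map (·.1)))
          (PySem.Set.ofList ((PySem.Set.ofList (((PySem.List.enumerate cs 0).filter (fun p => p.2 == 'a')).map (·.1))).map (· - 4))))).isEmpty = true
      ↔ ∃ k : Nat, pairAt cs k := by
  rw [List.isEmpty_iff]
  constructor
  · intro hne
    obtain ⟨x, hx⟩ := List.exists_mem_of_ne_nil _ hne
    rw [PySem.Set.mem_union, PySem.Set.mem_inter, PySem.Set.mem_inter] at hx
    rcases hx with ⟨hxa, hxb⟩ | ⟨hxb, hxa⟩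
    · obtain ⟨k, rfl, ha⟩ := (mem_posSet cs 'a' x).1 hxa
      rw [PySem.Set.mem_ofList, List.mem_map] at hxb
      obtain ⟨j, hj, hje⟩ := hxb
      obtain ⟨k', hk'e, hbv⟩ := (mem_posSet cs 'b' j).1 hj
      have : k' = k + 4 := by omega
      subst this
      exact ⟨k, Or.inl ⟨ha, hbv⟩⟩
    · obtain ⟨k, rfl, hbv⟩ := (mem_posSet cs 'b' x).1 hxb
      rw [PySem.Set.mem_ofList, List.mem_map] at hxa
      obtain ⟨j, hj, hje⟩ := hxa
      obtain ⟨k', hk'e, ha⟩ := (mem_posSet cs 'a' j).1 hj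
      have : k' = k + 4 := by omega
      subst this
      exact ⟨k, Or.inr ⟨hbv, ha⟩⟩
  · rintro ⟨k, hp⟩
    apply List.ne_nil_of_mem (a := (k : Int))
    rw [PySem.Set.mem_union, PySem.Set.mem_inter, PySem.Set.mem_inter]
    rcases hp with ⟨ha, hbv⟩ | ⟨hbv, ha⟩
    · left
      refine ⟨(mem_posSet cs 'a' _).2 ⟨k, rfl, ha⟩, ?_⟩
      rw [PySem.Set.mem_ofList, List.mem_map]
      exact ⟨((k + 4 : Nat) : Int), (mem_posSet cs 'b' _).2 ⟨k + 4, rfl, hbv⟩, by push_cast; ring⟩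
    · right
      refine ⟨(mem_posSet cs 'b' _).2 ⟨k, rfl, hbv⟩, ?_⟩
      rw [PySem.Set.mem_ofList, List.mem_map]
      exact ⟨((k + 4 : Nat) : Int), (mem_posSet cs 'a' _).2 ⟨k + 4, rfl, ha⟩, by push_cast; ring⟩

-- B = "true" iff a pair exists
theorem abcheck_alt_true_iff (str : String) :
    abcheck_alt str = "true" ↔ ∃ k : Nat, pairAt str.toList k := by
  simp only [abcheck_alt]
  rw [← hitSet_iff str.toList]
  split
  · next h => simp [h]
  · next h => simp [h]

theorem abcheck_alt_cases (str : String) :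
    abcheck_alt str = "true" ∨ abcheck_alt str = "false" := by
  simp only [abcheck_alt]
  split <;> simp

-- ===== VERDICT (by name: the statement is the Claim_ definition above) =====
theorem abcheck_spec : Claim_equal_abcheck := by
  intro str _
  show abcheck str = abcheck_alt str
  by_cases h : ∃ k : Nat, pairAt str.toList k
  · rw [(abcheck_true_iff str).2 h, (abcheck_alt_true_iff str).2 h]
  · have hA : abcheck str = "false" := by
      rcases abcheckGo_cases str.toList _ with hA | hA
      · exact absurd ((abcheck_true_iff str).1 hA) h
      · exact hA
    have hB : abcheck_alt str = "false" := by
      rcases abcheck_alt_cases str with hB | hB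
      · exact absurd ((abcheck_alt_true_iff str).1 hB) h
      · exact hB
    rw [hA, hB]
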